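/- GENERATED by mk_final_copies.py from the proof of the farm's unit `codebook_decode_deinterleave_repeat.4` (farm:codebook_decode_deinterleave_repeat.4.2: Proof.lean) as the
   re-elaboration sweep compiled it — do not edit. -/
import Asan.CheckWalk
import Vorbis.Spec.Units.codebook_decode_deinterleave_repeat_4
import Vorbis.Spec.Worked.codebook_decode_deinterleave_repeat_4_Lemmas

open X86 X86.User Asan Vorbis Vorbis.Spec Vorbis.Spec.Deint
open Vorbis.Spec.codebook_decode_deinterleave_repeat_4

set_option maxRecDepth 4000
set_option maxHeartbeats 4000000

/-- Segment 4 of `codebook_decode_deinterleave_repeat` (10DD6CH – 10DDFFH, C lines 1946 – 1951: the non-sequence arm,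
`for (i=0; i < effective; ++i) { float val = CODEBOOK_ELEMENT_FAST(c,z+i) + last; if (outputs[c_inter]) outputs[c_inter][p_inter]
+= val; if (++c_inter == ch) { c_inter = 0; ++p_inter; } }`): from `AtPlain` at the loop head 10DD70H to `AtJoin` at 10DE04H.
The segment IS the loop: `u_loop` at the entry state with the invariant `LoopInv` (Lemmas.lean: `Common` + the local copies of
the position + `[rsp+4]` = z·dim + r13d = `i` + `Res.DeintInner`), measure `effective − i`. The body is walked three times, once
per case that the branches decide: `i < effective` with `outputs[c_inter] ≠ NULL` (four check sites, the float read-modify-write,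
two back edges), `i < effective` with `outputs[c_inter] = NULL` (three check sites, two back edges), `i = effective` (the exit).
Every back edge is `loop_next` (Lemmas.lean): the stores of the round are `WinOff` (`off_stack`, `off_float`), so `Common` holds
again (`common_frame`). -/
theorem Vorbis.Spec.Worked.codebook_decode_deinterleave_repeat_4_ok : Vorbis.Spec.codebook_decode_deinterleave_repeat_4.Statement := by
  intro Lay hLay μ hμ u₀ hcode hload8 hload4 others frames Blk len ret e u ci pi eff zd td hat
  obtain ⟨hrip, hcommon, hlocals, hzd, hi0, hround⟩ := hat
  have he := hcommon.mid.atEntry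
  v_entry he
  have hpre := hcommon.pre
  have henv := env_of_pre hpre he_room
  have ht2 : Codebook.lookup_type e.mem (cOf e) = 2 := by
    rw [← hcommon.book.lookup_type]
    exact hcommon.type2
  obtain ⟨hND, hMsite⟩ := mult_site hpre ht2
  -- 10DD70H, the head of loop 1946 (stb_vorbis_fixed.c:1946 `for (i=0; i < effective; ++i)`): the entry assertion IS the
  -- invariant with `i = 0`; `c_inter`, `p_inter`, `i` are generalised
  have hinv0 : LoopInv others frames Blk len u₀ ret e eff zd td (pi * chOf e + ci) ci pi 0 u :=
    ⟨hcommon, hlocals, hzd, hi0, Res.DeintInner.init hround.inter hround.room⟩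
  clear hcommon hlocals hzd hi0
  obtain ⟨ci', pi', i, hinv⟩ : ∃ ci' pi' i, LoopInv others frames Blk len u₀ ret e eff zd td (pi * chOf e + ci) ci' pi' i u :=
    ⟨ci, pi, 0, hinv0⟩
  clear hinv0
  u_loop [ci', pi', i] (fun v => eff - (v.reg .r13).toNat)
  -- the body, from an arbitrary state `u` at the head with the invariant `hinv`
  have hcommon := hinv.common
  have hinner := hinv.inner
  obtain ⟨hci, hch16, hlen, hpile, hile, heff, hpilt⟩ := body_bounds hpre hround hinner
  have hzdle := hround.zd_le
  -- the registers and slots of the loop head, under names the walker reads (not `w_…`: those are cleared by the first step)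
  have b_rsp := hcommon.mid.rsp
  have b_r12 := hcommon.c
  have b_r13 := hinv.iReg
  have b_rbp := hinv.locals.ciReg
  have b_r15 := hinv.locals.effReg
  have zdSlot := hinv.zdSlot
  have piSlot := hinv.locals.piSlot
  have chSlot := hcommon.chSlot
  have outsSlot := hcommon.outsSlot
  have w_eq : Mem.EqOn Vorbis.L.textLo Vorbis.L.textHi u₀.mem u.mem := hcommon.mid.code
  have habi := hcommon.mid.inv
  have hdf := habi.1
  have hmx := habi.2
  have hsse := Vorbis.sseOK_of_abiInv habi
  have hun := hcommon.mid.untouched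
  have hshinv := hpre.book.reader.shadow.inv
  -- the operands of `cmp r13d, r15d` as numbers: the walker prunes the arm that contradicts `i < effective` / its negation
  have hte := part32_toInt_small eff (by omega)
  have hti := part32_toInt_small i (by omega)
  by_cases hlt : i < eff
  · -- an element is left: the body
    have hpi := hpilt hlt
    -- `c->multiplicands` and the address of `multiplicands[z·dim + i]`
    have hMread : u.mem.readLE (e.reg .rsi + 32) 8 = Codebook.multiplicands e.mem (cOf e) :=
      (read_mult u.mem (e.reg .rsi)).trans hcommon.book.multiplicands
    have hS2 := hMsite (zd + i) (by omega)
    have hw2 := site_where hpre.args hpre.book.reader.shadow.offText (by omega) hS2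
    have hA2 := addr_mult i zd (Codebook.multiplicands e.mem (cOf e)) (by omega) (by omega)
    generalize hM : Codebook.multiplicands e.mem (cOf e) = M at hMread hS2 hw2 hA2
    -- `outputs[c_inter]`
    have hwT : 0x119d40 ≤ (e.reg .rdx).toNat ∧ (e.reg .rdx).toNat + 8 * chOf e ≤ 0xC00000 ∧
        ((e.reg .rsp).toNat + 24 ≤ (e.reg .rdx).toNat ∨ (e.reg .rdx).toNat + 8 * chOf e ≤ 0x700000 ∨
          0x800000 ≤ (e.reg .rdx).toNat) := henv.table
    have hPread : u.mem.readLE (e.reg .rdx + Word.ofBV (BitVec.signExtend 64 (Word.part .w32 (UInt64.ofNat ci'))) * 8) 8 =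
        e.mem.ptr ((e.reg .rdx).toNat + 8 * ci') :=
      (read_table u.mem (e.reg .rdx) ci' (by omega) (by omega)).trans (hcommon.table ci' hci)
    have hA3 := addr_table (e.reg .rdx) ci' (by omega) (by omega)
    have hS3 : Site (Live (stackObjs frames ++ others)) ((e.reg .rdx).toNat + 8 * ci') 8 :=
      hpre.table.sub (by omega) (by show (e.reg .rdx).toNat + 8 * ci' + 8 ≤ (e.reg .rdx).toNat + 8 * chOf e; omega) (by decide)
    have hPlt := Mem.ptr_lt e.mem ((e.reg .rdx).toNat + 8 * ci')
    have hwc : 0x119d40 ≤ (e.reg .rsi).toNat ∧ (e.reg .rsi).toNat + 2120 ≤ 0xC00000 ∧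
        ((e.reg .rsp).toNat + 24 ≤ (e.reg .rsi).toNat ∨ (e.reg .rsi).toNat + 2120 ≤ 0x700000 ∨
          0x800000 ≤ (e.reg .rsi).toNat) := henv.c
    have hS1 : Site (Live (stackObjs frames ++ others)) ((e.reg .rsi).toNat + 32) 8 := by
      obtain ⟨B, hB, hin⟩ := hpre.book.book
      have h1 := hin.1
      have h2 : (e.reg .rsi).toNat + 2120 ≤ B.base + B.size := hin.2
      exact Site.of_blk hpre.book.reader.env.live hB (by omega) (by omega) (by decide)
    by_cases hnz : e.mem.ptr ((e.reg .rdx).toNat + 8 * ci') = 0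
    · -- `outputs[c_inter] == NULL`: no float access
      have hPread0 : u.mem.readLE (e.reg .rdx + Word.ofBV (BitVec.signExtend 64 (Word.part .w32 (UInt64.ofNat ci'))) * 8) 8 = 0 :=
        hPread.trans hnz
      clear hPread hPlt hnz
      clear hMsite hround hpilt hpre he he_rip he_code he_inv he_eq he_df he_mx he_sse
      u_walk hcode [hμ.vendor] until [Vorbis.L.codebook_decode_deinterleave_repeat.loop2, Vorbis.L.codebook_decode_deinterleave_repeat.cut8] span [Vorbis.L.textLo, Vorbis.L.textHi] side (v_side)
      case check_10dd7e =>
        -- 10DD7EH: the load of `c->multiplicands`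
        have hun' : ShadowUntouched u.mem s_10dd7e.mem := by v_untouched
        exact check_site hshinv (Mem.EqOn.trans hun hun') hS1 (by u_omega)
      case check_10dd9b =>
        -- 10DD9BH: the load of `multiplicands[z·dim + i]`
        have hun' : ShadowUntouched u.mem s_10dd9b.mem := by v_untouched
        exact check_site hshinv (Mem.EqOn.trans hun hun') hS2 hA2
      case check_10ddbc =>
        -- 10DDBCH: the load of `outputs[c_inter]`
        have hun' : ShadowUntouched u.mem s_10ddbc.mem := by v_untouched
        exact check_site hshinv (Mem.EqOn.trans hun hun') hS3 hA3
      · -- 10DDEFH taken: `++c_inter ≠ ch`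
        have hne : ¬ ci' + 1 = chOf e := by
          rw [incReg32_toNat ci' (by omega)] at hbr_10ddef
          omega
        have hs : Mem.SameExcept [⟨(e.reg .rsp).toNat - 112, (e.reg .rsp).toNat - 104⟩] u.mem s_10dd6c.mem := by
          u_same
        have hW : ∀ w, w ∈ [(⟨(e.reg .rsp).toNat - 112, (e.reg .rsp).toNat - 104⟩ : Span)] →
            WinOff others frames Blk len e w := by
          intro w hw
          simp only [List.mem_cons, List.not_mem_nil, or_false] at hw
          subst hw
          exact off_stack henv he_room _ (by simp only []; omega) (by simp only []; omega)
        have habi' : abiInv s_10dd6c := by v_inv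
        have h12 : s_10dd6c.reg .r12 = e.reg .rsi := (w_kept.get .r12 rfl).trans b_r12
        have h15 : s_10dd6c.reg .r15 = UInt64.ofNat eff := (w_kept.get .r15 rfl).trans b_r15
        have hpiS : s_10dd6c.mem.readLE (e.reg .rsp - 96) 4 = pi' := by u_frame piSlot
        have hzdS : s_10dd6c.mem.readLE (e.reg .rsp - 100) 4 = zd := by u_frame zdSlot
        have hn := loop_next hinv henv he_room hlt heff hs hW w_rsp h12 habi' w_r13 h15 (ci' + 1) pi'
          (by rw [if_neg hne]) (by rw [if_neg hne]) (by rw [w_rbp, incReg32 ci' (by omega)]) hpiS hzdS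
        exact ReachVia.done (Or.inr ⟨⟨ci' + 1, pi', i + 1, w_rip, hn.1⟩, hn.2⟩)
      · -- 10DDEFH not taken: `++c_inter == ch`: `c_inter = 0; ++p_inter` (10DDF5H stores into `[rsp+8]`)
        have heq : ci' + 1 = chOf e := by
          rw [incReg32_toNat ci' (by omega)] at hbr_10ddef
          omega
        have hs : Mem.SameExcept [⟨(e.reg .rsp).toNat - 112, (e.reg .rsp).toNat - 104⟩,
            ⟨(e.reg .rsp).toNat - 96, (e.reg .rsp).toNat - 92⟩] u.mem s_10dd6c.mem := by
          u_same
        have hW : ∀ w, w ∈ [(⟨(e.reg .rsp).toNat - 112, (e.reg .rsp).toNat - 104⟩ : Span),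
            ⟨(e.reg .rsp).toNat - 96, (e.reg .rsp).toNat - 92⟩] → WinOff others frames Blk len e w := by
          intro w hw
          simp only [List.mem_cons, List.not_mem_nil, or_false] at hw
          rcases hw with rfl | rfl
          · exact off_stack henv he_room _ (by simp only []; omega) (by simp only []; omega)
          · exact off_stack henv he_room _ (by simp only []; omega) (by simp only []; omega)
        have habi' : abiInv s_10dd6c := by v_inv
        have h12 : s_10dd6c.reg .r12 = e.reg .rsi := (w_kept.get .r12 rfl).trans b_r12
        have h15 : s_10dd6c.reg .r15 = UInt64.ofNat eff := (w_kept.get .r15 rfl).trans b_r15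
        have hpiS : s_10dd6c.mem.readLE (e.reg .rsp - 96) 4 = pi' + 1 := by
          rw [w_mem, Mem.readLE_writeLE_same _ _ _ _ (by decide), incmem32_toNat pi' (by omega)]
          exact Nat.mod_eq_of_lt (by omega)
        have hzdS : s_10dd6c.mem.readLE (e.reg .rsp - 100) 4 = zd := by u_frame zdSlot
        have hn := loop_next hinv henv he_room hlt heff hs hW w_rsp h12 habi' w_r13 h15 0 (pi' + 1)
          (by rw [if_pos heq]) (by rw [if_pos heq]) w_rbp hpiS hzdS
        exact ReachVia.done (Or.inr ⟨⟨0, pi' + 1, i + 1, w_rip, hn.1⟩, hn.2⟩)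
    · have hS4 := float_site hpre ci' pi' hci hpi hnz
      have hw4 := float_where hpre he_room ci' pi' hci hpi hnz
      have hoff4 := off_float hpre he_room ci' pi' hci hpi hnz
      obtain ⟨P, hP⟩ : ∃ P, e.mem.ptr ((e.reg .rdx).toNat + 8 * ci') = P := ⟨_, rfl⟩
      rw [hP] at hPread hPlt hnz hS4 hw4 hoff4
      have hA4 := addr_float P pi' (by omega) (by omega)
      clear hMsite hround hpilt hpre he he_rip he_code he_inv he_eq he_df he_mx he_sse
      u_walk hcode [hμ.vendor] until [Vorbis.L.codebook_decode_deinterleave_repeat.loop2, Vorbis.L.codebook_decode_deinterleave_repeat.cut8] span [Vorbis.L.textLo, Vorbis.L.textHi] side (v_side)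
      case check_10dd7e =>
        -- 10DD7EH: the load of `c->multiplicands`
        have hun' : ShadowUntouched u.mem s_10dd7e.mem := by v_untouched
        exact check_site hshinv (Mem.EqOn.trans hun hun') hS1 (by u_omega)
      case check_10dd9b =>
        -- 10DD9BH: the load of `multiplicands[z·dim + i]`
        have hun' : ShadowUntouched u.mem s_10dd9b.mem := by v_untouched
        exact check_site hshinv (Mem.EqOn.trans hun hun') hS2 hA2
      case check_10ddbc =>
        -- 10DDBCH: the load of `outputs[c_inter]`
        have hun' : ShadowUntouched u.mem s_10ddbc.mem := by v_untouched
        exact check_site hshinv (Mem.EqOn.trans hun hun') hS3 hA3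
      case check_10ddd5 =>
        -- 10DDD5H: the load of `outputs[c_inter][p_inter]`
        have hun' : ShadowUntouched u.mem s_10ddd5.mem := by v_untouched
        exact check_site hshinv (Mem.EqOn.trans hun hun') hS4 hA4
      · -- 10DDEFH taken: `++c_inter ≠ ch`
        have hne : ¬ ci' + 1 = chOf e := by
          rw [incReg32_toNat ci' (by omega)] at hbr_10ddef
          omega
        have hs : Mem.SameExcept [⟨(e.reg .rsp).toNat - 112, (e.reg .rsp).toNat - 104⟩,
            ⟨P + 4 * pi', P + 4 * pi' + 4⟩] u.mem s_10dd6c.mem := by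
          u_same
        have hW : ∀ w, w ∈ [(⟨(e.reg .rsp).toNat - 112, (e.reg .rsp).toNat - 104⟩ : Span),
            ⟨P + 4 * pi', P + 4 * pi' + 4⟩] → WinOff others frames Blk len e w := by
          intro w hw
          simp only [List.mem_cons, List.not_mem_nil, or_false] at hw
          rcases hw with rfl | rfl
          · exact off_stack henv he_room _ (by simp only []; omega) (by simp only []; omega)
          · exact hoff4
        have habi' : abiInv s_10dd6c := by v_inv
        have h12 : s_10dd6c.reg .r12 = e.reg .rsi := (w_kept.get .r12 rfl).trans b_r12
        have h15 : s_10dd6c.reg .r15 = UInt64.ofNat eff := (w_kept.get .r15 rfl).trans b_r15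
        have hpiS : s_10dd6c.mem.readLE (e.reg .rsp - 96) 4 = pi' := by u_frame piSlot
        have hzdS : s_10dd6c.mem.readLE (e.reg .rsp - 100) 4 = zd := by u_frame zdSlot
        have hn := loop_next hinv henv he_room hlt heff hs hW w_rsp h12 habi' w_r13 h15 (ci' + 1) pi'
          (by rw [if_neg hne]) (by rw [if_neg hne]) (by rw [w_rbp, incReg32 ci' (by omega)]) hpiS hzdS
        exact ReachVia.done (Or.inr ⟨⟨ci' + 1, pi', i + 1, w_rip, hn.1⟩, hn.2⟩)
      · -- 10DDEFH not taken: `++c_inter == ch`: `c_inter = 0; ++p_inter` (10DDF5H stores into `[rsp+8]`)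
        have heq : ci' + 1 = chOf e := by
          rw [incReg32_toNat ci' (by omega)] at hbr_10ddef
          omega
        have hs : Mem.SameExcept [⟨(e.reg .rsp).toNat - 112, (e.reg .rsp).toNat - 104⟩,
            ⟨(e.reg .rsp).toNat - 96, (e.reg .rsp).toNat - 92⟩,
            ⟨P + 4 * pi', P + 4 * pi' + 4⟩] u.mem s_10dd6c.mem := by
          u_same
        have hW : ∀ w, w ∈ [(⟨(e.reg .rsp).toNat - 112, (e.reg .rsp).toNat - 104⟩ : Span),
            ⟨(e.reg .rsp).toNat - 96, (e.reg .rsp).toNat - 92⟩,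
            ⟨P + 4 * pi', P + 4 * pi' + 4⟩] → WinOff others frames Blk len e w := by
          intro w hw
          simp only [List.mem_cons, List.not_mem_nil, or_false] at hw
          rcases hw with rfl | rfl | rfl
          · exact off_stack henv he_room _ (by simp only []; omega) (by simp only []; omega)
          · exact off_stack henv he_room _ (by simp only []; omega) (by simp only []; omega)
          · exact hoff4
        have habi' : abiInv s_10dd6c := by v_inv
        have h12 : s_10dd6c.reg .r12 = e.reg .rsi := (w_kept.get .r12 rfl).trans b_r12
        have h15 : s_10dd6c.reg .r15 = UInt64.ofNat eff := (w_kept.get .r15 rfl).trans b_r15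
        have hpiS : s_10dd6c.mem.readLE (e.reg .rsp - 96) 4 = pi' + 1 := by
          rw [w_mem, Mem.readLE_writeLE_same _ _ _ _ (by decide), incmem32_toNat pi' (by omega)]
          exact Nat.mod_eq_of_lt (by omega)
        have hzdS : s_10dd6c.mem.readLE (e.reg .rsp - 100) 4 = zd := by u_frame zdSlot
        have hn := loop_next hinv henv he_room hlt heff hs hW w_rsp h12 habi' w_r13 h15 0 (pi' + 1)
          (by rw [if_pos heq]) (by rw [if_pos heq]) w_rbp hpiS hzdS
        exact ReachVia.done (Or.inr ⟨⟨0, pi' + 1, i + 1, w_rip, hn.1⟩, hn.2⟩)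
  · -- `i == effective`: 10DD73H `jge` leaves the loop to the join 10DE04H; nothing was stored
    have hie : i = eff := by omega
    have hdone : Res.DeintInv ci' pi' (chOf e) (lenOf e) eff (dimOf e) := by
      rw [hie] at hinner
      exact hinner.done hround.eff_pos hround.eff_le
    have htd := hround.td_pos
    clear hMsite hround hpilt hpre he he_rip he_code he_inv he_eq he_df he_mx he_sse
    u_walk hcode [hμ.vendor] until [Vorbis.L.codebook_decode_deinterleave_repeat.loop2, Vorbis.L.codebook_decode_deinterleave_repeat.cut8] span [Vorbis.L.textLo, Vorbis.L.textHi] side (v_side)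
    -- 10DE04H: the exit assertion `AtJoin`, from the invariant (no register but RIP and the status flags changed)
    have hs : Mem.SameExcept [] u.mem s_10dd73.mem := by
      rw [w_mem]
      exact Mem.SameExcept.refl _ _
    have hW : ∀ w, w ∈ ([] : List Span) → WinOff others frames Blk len e w := by
      intro w hw
      exact absurd hw List.not_mem_nil
    have habi' : abiInv s_10dd73 := by v_inv
    have h12 : s_10dd73.reg .r12 = e.reg .rsi := (w_kept.get .r12 rfl).trans b_r12
    have hsp : s_10dd73.reg .rsp = e.reg .rsp - 104 := (w_kept.get .rsp rfl).trans b_rsp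
    have hc' := common_frame hcommon henv he_room hs hW hsp h12 habi'
    refine ReachVia.done (Or.inl ⟨ci', pi', w_rip, hc', ⟨?_, ?_, ?_, ?_⟩, hdone, htd⟩)
    · exact (w_kept.get .rbp rfl).trans b_rbp
    · rw [w_mem]
      exact piSlot
    · exact (w_kept.get .r15 rfl).trans b_r15
    · rw [w_mem]
      exact hinv.locals.tdSlot
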